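-- pv_equiv track=rewrite | github.com/frostburn/frostsynth | frostsynth/__init__.py | mix_longest_gen
-- ===== SOURCE A (Python) =====
-- def mix_longest_gen(sources):
--     sources = [iter(source) for source in sources]
--     while True:
--         result = 0
--         for source in sources[:]:
--             try:
--                 result += next(source)
--             except StopIteration:
--                 sources.remove(source)
--         if not sources:
--             return
--         yield result
-- ===== SOURCE B (Python) =====
-- def mix_longest_gen(sources):
--     cols = [list(source) for source in sources]
--     n = max((len(col) for col in cols), default=0)
--     for i in range(n):
--         yield sum(col[i] for col in cols if i < len(col))
-- ===== Notes on version B (the rewrite author's own statement) =====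
-- stated objective: idiomatic
-- what changed: Replaces A's mutable alive-list of iterators with try/except removal inside an unbounded while-loop by an index-based co-iteration: materialise the columns, compute the maximum length once, and yield for each index the sum over the columns still long enough.
import Mathlib
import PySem

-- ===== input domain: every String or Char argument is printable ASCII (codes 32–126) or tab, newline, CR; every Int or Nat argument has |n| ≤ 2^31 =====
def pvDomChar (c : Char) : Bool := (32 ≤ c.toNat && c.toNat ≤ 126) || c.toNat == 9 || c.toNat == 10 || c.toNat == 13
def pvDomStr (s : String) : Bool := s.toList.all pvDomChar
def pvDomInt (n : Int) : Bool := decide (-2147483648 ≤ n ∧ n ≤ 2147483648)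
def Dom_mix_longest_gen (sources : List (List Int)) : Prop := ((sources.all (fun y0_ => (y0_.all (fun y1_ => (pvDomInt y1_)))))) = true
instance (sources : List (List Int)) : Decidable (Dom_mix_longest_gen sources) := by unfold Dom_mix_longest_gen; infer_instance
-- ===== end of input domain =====

-- B replaces A's mutable alive-list of iterators (with try/except removal) by an
-- index-based co-iteration up to the maximum source length (objective: idiomatic).

-- ===== PORT A =====
-- total fuel for the while-loop (one unit per consumed element, plus one)
def pvSumLen (s : List (List Int)) : Nat := (s.map List.length).sum

-- the 'while True' loop of A: result sums one next() from each live source,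
-- exhausted sources are removed, loop returns (no yield) once no sources remain.
def mixLoop : Nat → List (List Int) → List Int
  | 0, _ => []
  | fuel + 1, sources =>
    let result := sources.foldl (fun r c => match c with | [] => r | h :: _ => r + h) 0
    let sources' := (sources.filter (fun c => !c.isEmpty)).map List.tail
    if sources' = [] then [] else result :: mixLoop fuel sources'

def mix_longest_gen (sources : List (List Int)) : List Int :=
  mixLoop (pvSumLen sources + 1) sources

-- ===== PORT B =====
def mix_longest_gen_alt (sources : List (List Int)) : List Int :=
  let cols := sources
  let n := cols.foldl (fun m c => max m c.length) 0
  (List.range n).map (fun i =>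
    cols.foldl (fun r c => if i < c.length then r + c.getD i 0 else r) 0)

-- ===== PRECONDITION & SPEC =====
def Spec_mix_longest_gen (sources : List (List Int)) (out : List Int) : Prop := out = mix_longest_gen_alt sources
instance (sources : List (List Int)) (out : List Int) : Decidable (Spec_mix_longest_gen sources out) := by unfold Spec_mix_longest_gen; infer_instance

-- ===== CLAIM (what is proved, stated in full; the proofs are below) =====
def Claim_equal_mix_longest_gen : Prop := ∀ (sources : List (List Int)), Dom_mix_longest_gen sources → Spec_mix_longest_gen sources (mix_longest_gen sources)

-- ===== LEMMAS AND PROOFS =====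

-- the initial accumulator is a lower bound of the running maximum
lemma pv_init_le_foldl (s : List (List Int)) (a : Nat) :
    a ≤ s.foldl (fun m c => max m c.length) a := by
  induction s generalizing a with
  | nil => exact le_refl _
  | cons x t ih =>
    exact le_trans (le_max_left a x.length) (ih (max a x.length))

-- n is an upper bound of every column length
lemma pv_le_foldl_max (s : List (List Int)) (a : Nat) (c : List Int) (hc : c ∈ s) :
    c.length ≤ s.foldl (fun m c => max m c.length) a := by
  induction s generalizing a with
  | nil => cases hc
  | cons x t ih =>
    simp only [List.foldl_cons]
    rcases List.mem_cons.mp hc with h | h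
    · subst h; exact le_trans (le_max_right a c.length) (pv_init_le_foldl t _)
    · exact ih (max a x.length) h

-- the maximum over the tails is the maximum over the sources, minus one
lemma pv_foldl_max_sub (s : List (List Int)) (a : Nat) :
    s.foldl (fun m c => max m (c.length - 1)) (a - 1)
      = (s.foldl (fun m c => max m c.length) a) - 1 := by
  induction s generalizing a with
  | nil => rfl
  | cons x t ih =>
    simp only [List.foldl_cons]
    have h : max (a - 1) (x.length - 1) = max a x.length - 1 := by omega
    rw [h, ih]

-- empty columns do not change the maximum
lemma pv_foldl_max_filter (s : List (List Int)) (a : Nat) :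
    (s.filter (fun c => !c.isEmpty)).foldl (fun m c => max m c.length) a
      = s.foldl (fun m c => max m c.length) a := by
  induction s generalizing a with
  | nil => rfl
  | cons x t ih =>
    cases x with
    | nil =>
      rw [show List.filter (fun c => !c.isEmpty) (([] : List Int) :: t)
            = List.filter (fun c => !c.isEmpty) t from by simp,
          List.foldl_cons, show max a (List.length ([] : List Int)) = a from by simp]
      exact ih a
    | cons hd t0 =>
      rw [show List.filter (fun c => !c.isEmpty) ((hd :: t0) :: t)
            = (hd :: t0) :: List.filter (fun c => !c.isEmpty) t from by simp,
          List.foldl_cons, List.foldl_cons]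
      exact ih _

-- empty columns do not change any row sum
lemma pv_foldl_sum_filter (s : List (List Int)) (i : Nat) (r : Int) :
    (s.filter (fun c => !c.isEmpty)).foldl (fun r c => if i < c.length then r + c.getD i 0 else r) r
      = s.foldl (fun r c => if i < c.length then r + c.getD i 0 else r) r := by
  induction s generalizing r with
  | nil => rfl
  | cons x t ih =>
    cases x with
    | nil =>
      rw [show List.filter (fun c => !c.isEmpty) (([] : List Int) :: t)
            = List.filter (fun c => !c.isEmpty) t from by simp,
          List.foldl_cons, if_neg (by simp)]
      exact ih r
    | cons hd t0 =>
      rw [show List.filter (fun c => !c.isEmpty) ((hd :: t0) :: t)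
            = (hd :: t0) :: List.filter (fun c => !c.isEmpty) t from by simp,
          List.foldl_cons, List.foldl_cons]
      exact ih _

-- B ignores empty columns entirely
lemma pv_alt_filter (s : List (List Int)) :
    mix_longest_gen_alt (s.filter (fun c => !c.isEmpty)) = mix_longest_gen_alt s := by
  unfold mix_longest_gen_alt
  simp only [pv_foldl_max_filter]
  exact List.map_congr_left (fun i _ => pv_foldl_sum_filter s i 0) ▸ rfl

-- dropping already-empty columns before tailing = tailing and then dropping empties, up to empties
lemma pv_filter_map_tail (s : List (List Int)) :
    (((s.filter (fun c => !c.isEmpty)).map List.tail).filter (fun c => !c.isEmpty))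
      = ((s.map List.tail).filter (fun c => !c.isEmpty)) := by
  induction s with
  | nil => rfl
  | cons x t ih =>
    cases x with
    | nil =>
      rw [show List.filter (fun c => !c.isEmpty) (([] : List Int) :: t)
            = List.filter (fun c => !c.isEmpty) t from by simp,
          List.map_cons, List.tail_nil,
          show List.filter (fun c => !c.isEmpty) (([] : List Int) :: t.map List.tail)
            = List.filter (fun c => !c.isEmpty) (t.map List.tail) from by simp]
      exact ih
    | cons hd t0 =>
      rw [show List.filter (fun c => !c.isEmpty) ((hd :: t0) :: t)
            = (hd :: t0) :: List.filter (fun c => !c.isEmpty) t from by simp,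
          List.map_cons, List.map_cons, List.tail_cons,
          List.filter_cons, List.filter_cons, ih]

-- B on the all-empty input is empty
lemma pv_alt_nil (s : List (List Int)) (h : s.filter (fun c => !c.isEmpty) = []) :
    mix_longest_gen_alt s = [] := by
  rw [← pv_alt_filter s, h]; rfl

-- B's unfolding step: first row, then B of the tails
lemma pv_alt_cons (s : List (List Int)) (h : s.filter (fun c => !c.isEmpty) ≠ []) :
    mix_longest_gen_alt s
      = (s.foldl (fun r c => match c with | [] => r | h :: _ => r + h) 0)
        :: mix_longest_gen_alt (s.map List.tail) := by
  have hex : ¬ ∀ c ∈ s, ¬((!c.isEmpty) = true) :=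
    fun hall => h (List.filter_eq_nil_iff.mpr hall)
  push Not at hex
  obtain ⟨c, hcmem, hc⟩ := hex
  have hc1 : 1 ≤ c.length := by cases c with
    | nil => simp at hc
    | cons hd t0 => simp
  have hn : 1 ≤ s.foldl (fun m c => max m c.length) 0 :=
    le_trans hc1 (pv_le_foldl_max s 0 c hcmem)
  have hsub : (s.map List.tail).foldl (fun m c => max m c.length) 0
      = s.foldl (fun m c => max m c.length) 0 - 1 := by
    rw [List.foldl_map]
    have hfun : (fun (m : Nat) (c : List Int) => max m c.tail.length)
        = fun m c => max m (c.length - 1) := by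
      funext m c; rw [List.length_tail]
    rw [hfun]
    simpa using pv_foldl_max_sub s 0
  have hnsucc : s.foldl (fun m c => max m c.length) 0
      = (s.map List.tail).foldl (fun m c => max m c.length) 0 + 1 := by omega
  unfold mix_longest_gen_alt
  dsimp only
  rw [hnsucc, List.range_succ_eq_map, List.map_cons, List.map_map]
  congr 1
  · have hF : (fun (r : Int) (c : List Int) => if 0 < c.length then r + c.getD 0 0 else r)
        = fun r c => match c with | [] => r | h :: _ => r + h := by
      funext r c; cases c <;> simp
    rw [hF]
  · have hFi : ((fun i => s.foldl (fun r c => if i < c.length then r + c.getD i 0 else r) 0)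
        ∘ Nat.succ)
        = fun i => (s.map List.tail).foldl
            (fun r c => if i < c.length then r + c.getD i 0 else r) 0 := by
      funext i
      rw [Function.comp_apply, List.foldl_map]
      have hfun : (fun (r : Int) (c : List Int) =>
            if i.succ < c.length then r + c.getD i.succ 0 else r)
          = fun r c => if i < c.tail.length then r + c.tail.getD i 0 else r := by
        funext r c
        cases c with
        | nil => simp
        | cons hd t0 => simp
      rw [hfun]
    rw [hFi]

-- the tails lose at least one element in total
lemma pv_sumLen_tail_le (s : List (List Int)) :
    pvSumLen ((s.filter (fun c => !c.isEmpty)).map List.tail) ≤ pvSumLen s := by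
  induction s with
  | nil => exact le_refl _
  | cons x t ih =>
    cases x with
    | nil => simpa [pvSumLen] using le_trans ih (by simp [pvSumLen])
    | cons h t0 =>
      simp only [pvSumLen, List.filter_cons, List.isEmpty_cons, Bool.not_false,
        List.map_cons, List.map_map, List.sum_cons] at *
      simpa using Nat.add_le_add (by simp) ih

lemma pv_sumLen_tail_lt (s : List (List Int)) (h : s.filter (fun c => !c.isEmpty) ≠ []) :
    pvSumLen ((s.filter (fun c => !c.isEmpty)).map List.tail) < pvSumLen s := by
  induction s with
  | nil => simp at h
  | cons x t ih =>
    cases x with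
    | nil =>
      simp only [List.filter_cons, List.isEmpty_nil, Bool.not_true] at h ⊢
      simp only [pvSumLen, List.map_cons, List.length_nil, List.sum_cons, Nat.zero_add]
      exact ih (by simpa using h)
    | cons hd t0 =>
      simp only [List.filter_cons, List.isEmpty_cons, Bool.not_false]
      simp only [pvSumLen, List.map_cons, List.sum_cons]
      have := pv_sumLen_tail_le t
      simp only [pvSumLen, List.map_map] at this ⊢
      simp
      omega

-- main loop invariant: with enough fuel, A's loop computes B
lemma pv_mixLoop_eq (fuel : Nat) (s : List (List Int)) (hf : pvSumLen s < fuel) :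
    mixLoop fuel s = mix_longest_gen_alt s := by
  induction fuel generalizing s with
  | zero => omega
  | succ f ih =>
    by_cases hc : s.filter (fun c => !c.isEmpty) = []
    · simp only [mixLoop, hc, List.map_nil, reduceIte]
      exact (pv_alt_nil s hc).symm
    · have hne : (s.filter (fun c => !c.isEmpty)).map List.tail ≠ [] := by
        simpa using hc
      simp only [mixLoop, if_neg hne]
      rw [pv_alt_cons s hc]
      congr 1
      have h1 : mixLoop f ((s.filter (fun c => !c.isEmpty)).map List.tail)
          = mix_longest_gen_alt ((s.filter (fun c => !c.isEmpty)).map List.tail) :=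
        ih _ (by have := pv_sumLen_tail_lt s hc; omega)
      rw [h1, ← pv_alt_filter ((s.filter (fun c => !c.isEmpty)).map List.tail),
        pv_filter_map_tail, pv_alt_filter]

-- ===== VERDICT (by name: the statement is the Claim_ definition above) =====
theorem mix_longest_gen_spec : Claim_equal_mix_longest_gen := by
  intro sources _
  unfold Spec_mix_longest_gen mix_longest_gen
  exact pv_mixLoop_eq _ _ (Nat.lt_succ_self _)
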